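-- pv_equiv track=rewrite | github.com/jasmine206/Python-Excercises | Problem3/advancedDataTypes/advancedDataTypes.py | SameSetOfNumber
-- ===== SOURCE A (Python) =====
-- def SameSetOfNumber(my_list, my_tuple, my_set):
--     if len(my_set) != len(my_tuple) or len(my_list) != len(my_set):
--         return False
--     else:
--         count_same_number = 0
--         for item in my_set:
--             if item in my_list and item in my_tuple:
--                 count_same_number += 1
--         if count_same_number == len(my_set):
--             return True
--         else:
--             return False
-- ===== SOURCE B (Python) =====
-- def SameSetOfNumber(my_list, my_tuple, my_set):
--     # Sort-and-compare: the collections agree (equal lengths + every set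
--     # element present in list and tuple) iff list and tuple are both
--     # rearrangements of the set's distinct elements.
--     key = sorted(my_set)
--     return sorted(my_list) == key and sorted(my_tuple) == key
-- ===== Notes on version B (the rewrite author's own statement) =====
-- stated objective: alternative
-- what changed: Drops the length guard and the element-by-element membership-counting loop entirely: B sorts all three collections once and returns whether sorted(list) and sorted(tuple) both equal sorted(set), correct because the set's elements are distinct so A's condition is exactly 'list and tuple are permutations of the set'.
import Mathlib
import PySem

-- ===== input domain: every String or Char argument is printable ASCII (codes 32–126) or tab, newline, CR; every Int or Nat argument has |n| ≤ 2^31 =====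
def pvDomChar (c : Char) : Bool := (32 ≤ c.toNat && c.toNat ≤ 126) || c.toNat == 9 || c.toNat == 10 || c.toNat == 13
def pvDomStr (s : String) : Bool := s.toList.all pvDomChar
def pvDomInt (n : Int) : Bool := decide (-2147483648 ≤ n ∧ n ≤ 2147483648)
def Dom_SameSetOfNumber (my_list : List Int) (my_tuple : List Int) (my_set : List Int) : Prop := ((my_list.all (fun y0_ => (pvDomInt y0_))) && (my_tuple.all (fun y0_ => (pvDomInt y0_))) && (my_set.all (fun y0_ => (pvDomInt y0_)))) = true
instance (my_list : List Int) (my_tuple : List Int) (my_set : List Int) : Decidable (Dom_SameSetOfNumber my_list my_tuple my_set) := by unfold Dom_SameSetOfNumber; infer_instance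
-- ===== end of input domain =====

-- ===== PORT A =====
-- B replaces the length guard + membership-counting loop by sorting the three
-- collections and comparing; return value only (no mutation in either program).
def SameSetOfNumber (my_list : List Int) (my_tuple : List Int) (my_set : List Int) : Bool :=
  if my_set.length ≠ my_tuple.length ∨ my_list.length ≠ my_set.length then
    false
  else
    let count_same_number : Int :=
      my_set.foldl (fun c item =>
        if my_list.contains item && my_tuple.contains item then c + 1 else c) 0
    if count_same_number = (my_set.length : Int) then true else false

-- ===== PORT B =====
def SameSetOfNumber_alt (my_list : List Int) (my_tuple : List Int) (my_set : List Int) : Bool :=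
  let key := PySem.List.sorted my_set (fun x => x) false
  (PySem.List.sorted my_list (fun x => x) false == key) &&
  (PySem.List.sorted my_tuple (fun x => x) false == key)

-- ===== PRECONDITION & SPEC =====
-- Pre_: my_set arrives as a Python set, so its elements are distinct; a List Int
-- with duplicates cannot arise from the Python call and is excluded.
def Pre_SameSetOfNumber (my_list : List Int) (my_tuple : List Int) (my_set : List Int) : Prop := my_set.Nodup
instance (my_list : List Int) (my_tuple : List Int) (my_set : List Int) : Decidable (Pre_SameSetOfNumber my_list my_tuple my_set) := by unfold Pre_SameSetOfNumber; infer_instance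
def pvWitness_SameSetOfNumber : List Int × List Int × List Int := ([2, 1], [1, 2], [1, 2])

def Spec_SameSetOfNumber (my_list : List Int) (my_tuple : List Int) (my_set : List Int) (out : Bool) : Prop := out = SameSetOfNumber_alt my_list my_tuple my_set
instance (my_list : List Int) (my_tuple : List Int) (my_set : List Int) (out : Bool) : Decidable (Spec_SameSetOfNumber my_list my_tuple my_set out) := by unfold Spec_SameSetOfNumber; infer_instance

-- ===== CLAIM =====
def Claim_equal_SameSetOfNumber : Prop := ∀ (my_list : List Int) (my_tuple : List Int) (my_set : List Int), Dom_SameSetOfNumber my_list my_tuple my_set → Pre_SameSetOfNumber my_list my_tuple my_set → Spec_SameSetOfNumber my_list my_tuple my_set (SameSetOfNumber my_list my_tuple my_set)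

-- ===== LEMMAS AND PROOFS =====

-- the counting loop, shifted by its accumulator, is countP
lemma foldl_count_eq_countP (p : Int → Bool) (xs : List Int) (c : Int) :
    xs.foldl (fun c item => if p item then c + 1 else c) c = c + xs.countP p := by
  induction xs generalizing c with
  | nil => simp
  | cons x xs ih =>
    simp only [List.foldl_cons, List.countP_cons, ih]
    by_cases h : p x = true <;> simp [h] <;> ring

-- for a duplicate-free s: s ⊆ l with equal lengths ⟺ l is a permutation of s
lemma perm_iff_subset_of_nodup (s l : List Int) (hnd : s.Nodup)
    (hlen : l.length = s.length) : l.Perm s ↔ ∀ x ∈ s, x ∈ l := by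
  constructor
  · intro hp x hx; exact hp.mem_iff.mpr hx
  · intro hsub
    have hsp : s.Subperm l := hnd.subperm (fun x hx => hsub x hx)
    exact (hsp.perm_of_length_le (le_of_eq hlen)).symm

-- B is true exactly when list and tuple are permutations of the set
lemma alt_iff_perm (l t s : List Int) :
    SameSetOfNumber_alt l t s = true ↔ l.Perm s ∧ t.Perm s := by
  unfold SameSetOfNumber_alt
  simp only [Bool.and_eq_true, beq_iff_eq]
  rw [PySem.List.sorted_id_eq_sorted_id_iff_perm, PySem.List.sorted_id_eq_sorted_id_iff_perm]

-- ===== VERDICT =====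
theorem SameSetOfNumber_spec : Claim_equal_SameSetOfNumber := by
  intro my_list my_tuple my_set _ hnd
  unfold Spec_SameSetOfNumber
  by_cases hlen : my_set.length = my_tuple.length ∧ my_list.length = my_set.length
  · obtain ⟨h1, h2⟩ := hlen
    unfold SameSetOfNumber
    rw [if_neg (by simp [h1, h2])]
    rw [foldl_count_eq_countP]
    simp only [zero_add, List.contains_eq_mem]
    rcases Bool.eq_false_or_eq_true (SameSetOfNumber_alt my_list my_tuple my_set) with hb | hb
    · rw [hb]
      obtain ⟨hpl, hpt⟩ := (alt_iff_perm my_list my_tuple my_set).mp hb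
      have hc : my_set.countP (fun item => decide (item ∈ my_list) && decide (item ∈ my_tuple))
          = my_set.length := by
        apply List.countP_eq_length.mpr
        intro x hx
        simp only [Bool.and_eq_true, decide_eq_true_eq]
        exact ⟨hpl.mem_iff.mpr hx, hpt.mem_iff.mpr hx⟩
      rw [if_pos (by omega)]
    · rw [hb]
      have hnp := (not_iff_not.mpr (alt_iff_perm my_list my_tuple my_set)).mp
        (by simp [hb])
      have : ¬ ∀ x ∈ my_set, decide (x ∈ my_list) && decide (x ∈ my_tuple) := by
        intro hall
        apply hnp
        constructor
        · exact (perm_iff_subset_of_nodup my_set my_list hnd h2).mpr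
            (fun x hx => by have := hall x hx; simp only [Bool.and_eq_true, decide_eq_true_eq] at this; exact this.1)
        · exact (perm_iff_subset_of_nodup my_set my_tuple hnd (h1.symm)).mpr
            (fun x hx => by have := hall x hx; simp only [Bool.and_eq_true, decide_eq_true_eq] at this; exact this.2)
      have hlt : my_set.countP (fun item => decide (item ∈ my_list) && decide (item ∈ my_tuple))
          < my_set.length := by
        rcases lt_or_eq_of_le (List.countP_le_length (l := my_set)
          (p := fun item => decide (item ∈ my_list) && decide (item ∈ my_tuple))) with h | h
        · exact h
        · exact absurd (List.countP_eq_length.mp h) this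
      rw [if_neg (by omega)]
  · unfold SameSetOfNumber
    rw [if_pos (by omega)]
    rcases Bool.eq_false_or_eq_true (SameSetOfNumber_alt my_list my_tuple my_set) with hb | hb
    · obtain ⟨hpl, hpt⟩ := (alt_iff_perm my_list my_tuple my_set).mp hb
      exact absurd ⟨hpt.length_eq.symm, hpl.length_eq⟩ hlen
    · exact hb.symm
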